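-- pv_equiv track=rewrite | github.com/Tulpana/ARC-AGI-2 | arc_agi_2_submission/ril/outline_ops.py | fill_interior
-- ===== SOURCE A (Python) =====
-- from typing import Dict, List, Optional, Set, Tuple
--
-- Grid = List[List[int]]
--
-- def fill_interior(grid: Grid) -> Grid:
--     """
--     Fill the interior of outlined shapes.
--     Useful for converting outlines back to solid shapes.
--     """
--     if not grid or not grid[0]:
--         return grid
--
--     h, w = len(grid), len(grid[0])
--     result = [row[:] for row in grid]
--
--     # Flood fill from edges to find exterior
--     exterior = [[False] * w for _ in range(h)]
--     stack = []
--
--     # Add all edge pixels that are background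
--     for r in range(h):
--         for c in range(w):
--             if (r == 0 or r == h-1 or c == 0 or c == w-1) and grid[r][c] == 0:
--                 stack.append((r, c))
--                 exterior[r][c] = True
--
--     # Flood fill exterior
--     while stack:
--         r, c = stack.pop()
--         for dr, dc in [(0, 1), (0, -1), (1, 0), (-1, 0)]:
--             nr, nc = r + dr, c + dc
--             if 0 <= nr < h and 0 <= nc < w and not exterior[nr][nc] and grid[nr][nc] == 0:
--                 exterior[nr][nc] = True
--                 stack.append((nr, nc))
--
--     # Fill interior (non-exterior background) with color
--     # Use most common non-background color
--     from collections import Counter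
--     colors = [grid[r][c] for r in range(h) for c in range(w) if grid[r][c] != 0]
--     if colors:
--         fill_color = Counter(colors).most_common(1)[0][0]
--     else:
--         fill_color = 1
--
--     for r in range(h):
--         for c in range(w):
--             if grid[r][c] == 0 and not exterior[r][c]:
--                 result[r][c] = fill_color
--
--     return result
-- ===== SOURCE B (Python) =====
-- from typing import List
--
-- Grid = List[List[int]]
--
-- def fill_interior(grid: Grid) -> Grid:
--     """
--     Fill the interior of outlined shapes by computing the exterior as a
--     dataflow fixpoint: start from the border background cells and repeatedly
--     sweep the whole grid, marking any background cell adjacent to an already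
--     exterior cell, until a sweep changes nothing.  No stack, no Counter.
--     """
--     if not grid or not grid[0]:
--         return grid
--
--     h, w = len(grid), len(grid[0])
--
--     # exterior := border background cells
--     ext = [[(r == 0 or r == h - 1 or c == 0 or c == w - 1) and grid[r][c] == 0
--             for c in range(w)] for r in range(h)]
--
--     # saturate: a background cell next to an exterior cell is exterior
--     changed = True
--     while changed:
--         changed = False
--         for r in range(h):
--             for c in range(w):
--                 if grid[r][c] == 0 and not ext[r][c] and (
--                         (r > 0 and ext[r - 1][c]) or
--                         (r + 1 < h and ext[r + 1][c]) or
--                         (c > 0 and ext[r][c - 1]) or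
--                         (c + 1 < w and ext[r][c + 1])):
--                     ext[r][c] = True
--                     changed = True
--
--     # fill colour: the non-zero colour with the highest count, first seen wins
--     counts = {}
--     for r in range(h):
--         for c in range(w):
--             v = grid[r][c]
--             if v != 0:
--                 counts[v] = counts.get(v, 0) + 1
--     fill = max(counts, key=counts.get) if counts else 1
--
--     result = [row[:] for row in grid]
--     for r in range(h):
--         for c in range(w):
--             if grid[r][c] == 0 and not ext[r][c]:
--                 result[r][c] = fill
--     return result
-- ===== Notes on version B (the rewrite author's own statement) =====
-- stated objective: alternative
-- what changed: Replaces the explicit-stack flood fill from border background cells by a dataflow fixpoint (repeated whole-grid sweeps that mark background cells adjacent to already-exterior cells until stabilisation), and replaces Counter(colors).most_common(1) by a plain counting dict with max(counts, key=counts.get).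
import Mathlib
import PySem

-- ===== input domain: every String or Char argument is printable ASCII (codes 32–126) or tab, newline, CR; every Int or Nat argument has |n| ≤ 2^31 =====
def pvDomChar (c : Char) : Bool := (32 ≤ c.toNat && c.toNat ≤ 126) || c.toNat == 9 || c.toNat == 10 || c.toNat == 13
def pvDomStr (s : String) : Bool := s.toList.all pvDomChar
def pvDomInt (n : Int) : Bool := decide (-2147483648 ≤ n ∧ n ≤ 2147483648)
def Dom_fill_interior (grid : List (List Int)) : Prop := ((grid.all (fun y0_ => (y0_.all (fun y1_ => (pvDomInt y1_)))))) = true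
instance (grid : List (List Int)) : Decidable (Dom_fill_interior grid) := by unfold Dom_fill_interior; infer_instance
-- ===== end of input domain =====

-- B replaces A's explicit-stack flood fill by a dataflow fixpoint (whole-grid sweeps to
-- stabilisation) and Counter(...).most_common(1) by a counting dict with max(counts, key=...):
-- an alternative algorithm of similar size, not claimed faster.

-- ===== PORT A =====
-- shared primitive accessor: grid[r][c]; exact on indices in bounds (Pre_ guarantees all uses)
def pvAt (g : List (List Int)) (r c : ℕ) : Int := (g.getD r []).getD c 0

-- the row-major list of cell coordinates (the double loop 'for r in range(h): for c in range(w)')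
def pvCells (h w : ℕ) : List (ℕ × ℕ) :=
  (List.range h).flatMap (fun r => (List.range w).map (fun c => (r, c)))

-- the grid rectangle as a Finset (used only for termination measures)
def pvBox (h w : ℕ) : Finset (ℕ × ℕ) := Finset.range h ×ˢ Finset.range w

-- A's seeding loop: marks edge background cells exterior and pushes them; the boolean
-- matrix 'exterior' is represented as the Finset of its true cells; stack top = list head
-- (Python appends to the end and pops from the end)
def pvASeed (g : List (List Int)) (h w : ℕ) : Finset (ℕ × ℕ) × List (ℕ × ℕ) :=
  (pvCells h w).foldl
    (fun s p =>
      if (p.1 = 0 ∨ p.1 = h - 1 ∨ p.2 = 0 ∨ p.2 = w - 1) ∧ pvAt g p.1 p.2 = 0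
      then (insert p s.1, p :: s.2) else s)
    (∅, [])

-- one neighbour test of A's flood fill, in the order Python checks it
def pvAStep (g : List (List Int)) (h w : ℕ) (r c : ℕ)
    (s : Finset (ℕ × ℕ) × List (ℕ × ℕ)) (d : Int × Int) : Finset (ℕ × ℕ) × List (ℕ × ℕ) :=
  let nr : Int := (r : Int) + d.1
  let nc : Int := (c : Int) + d.2
  if 0 ≤ nr ∧ nr < (h : Int) ∧ 0 ≤ nc ∧ nc < (w : Int) ∧
      (nr.toNat, nc.toNat) ∉ s.1 ∧ pvAt g nr.toNat nc.toNat = 0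
  then (insert (nr.toNat, nc.toNat) s.1, (nr.toNat, nc.toNat) :: s.2)
  else s

-- termination measure bookkeeping for the flood-fill loop (cited in decreasing_by)
theorem pvAFold_meas (g : List (List Int)) (h w r c : ℕ)
    (ds : List (Int × Int)) (s : Finset (ℕ × ℕ) × List (ℕ × ℕ)) :
    5 * (pvBox h w \ (ds.foldl (pvAStep g h w r c) s).1).card +
        (ds.foldl (pvAStep g h w r c) s).2.length ≤
      5 * (pvBox h w \ s.1).card + s.2.length := by
  have hstep : ∀ (s : Finset (ℕ × ℕ) × List (ℕ × ℕ)) (d : Int × Int),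
      5 * (pvBox h w \ (pvAStep g h w r c s d).1).card + (pvAStep g h w r c s d).2.length ≤
        5 * (pvBox h w \ s.1).card + s.2.length := by
    intro s d
    simp only [pvAStep]
    split
    · rename_i hcond
      obtain ⟨h1, h2, h3, h4, h5, -⟩ := hcond
      have hmem : (((r : Int) + d.1).toNat, ((c : Int) + d.2).toNat) ∈ pvBox h w \ s.1 := by
        rw [Finset.mem_sdiff]
        refine ⟨?_, h5⟩
        simp only [pvBox, Finset.mem_product, Finset.mem_range]
        exact ⟨by omega, by omega⟩
      have hpos : 0 < (pvBox h w \ s.1).card := Finset.card_pos.mpr ⟨_, hmem⟩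
      have hcard : (pvBox h w \ insert (((r : Int) + d.1).toNat, ((c : Int) + d.2).toNat) s.1).card
          = (pvBox h w \ s.1).card - 1 := by
        rw [Finset.sdiff_insert, Finset.card_erase_of_mem hmem]
      simp only [List.length_cons, hcard]
      omega
    · exact le_refl _
  induction ds generalizing s with
  | nil => exact le_refl _
  | cons d ds ih =>
    exact le_trans (ih (pvAStep g h w r c s d)) (hstep s d)

-- A's 'while stack:' flood fill
def pvALoop (g : List (List Int)) (h w : ℕ) :
    Finset (ℕ × ℕ) → List (ℕ × ℕ) → Finset (ℕ × ℕ)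
  | ext, [] => ext
  | ext, (r, c) :: rest =>
    let s := [((0 : Int), (1 : Int)), (0, -1), (1, 0), (-1, 0)].foldl
      (pvAStep g h w r c) (ext, rest)
    pvALoop g h w s.1 s.2
termination_by ext st => 5 * (pvBox h w \ ext).card + st.length
decreasing_by
  exact lt_of_le_of_lt (pvAFold_meas g h w r c _ (ext, rest)) (by simp)

-- shared final write-back loop ('result = [row[:] for row in grid]' then the fill loop;
-- textually identical in A and in B)
def pvWrite (g : List (List Int)) (h w : ℕ) (ext : Finset (ℕ × ℕ)) (fill : Int) :
    List (List Int) :=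
  (List.range h).foldl
    (fun res r =>
      (List.range w).foldl
        (fun res c =>
          if pvAt g r c = 0 ∧ (r, c) ∉ ext then res.set r ((res.getD r []).set c fill)
          else res)
        res)
    g

def fill_interior (grid : List (List Int)) : List (List Int) :=
  if grid = [] ∨ grid.headD [] = [] then grid
  else
    let h := grid.length
    let w := (grid.headD []).length
    let seeded := pvASeed grid h w
    let ext := pvALoop grid h w seeded.1 seeded.2
    let colors := (List.range h).flatMap
      (fun r => (List.range w).filterMap
        (fun c => if pvAt grid r c ≠ 0 then some (pvAt grid r c) else none))
    -- Counter(colors).most_common(1)[0][0]: most_common is sorted(items, key=count, reverse=True)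
    let fill : Int :=
      if colors ≠ [] then
        ((PySem.List.sorted (PySem.Dict.counter colors).items (fun p => p.2) true).headD (0, 0)).1
      else 1
    pvWrite grid h w ext fill

-- ===== PORT B =====
-- B's initial exterior: the set comprehension over edge background cells
def pvBSeed (g : List (List Int)) (h w : ℕ) : Finset (ℕ × ℕ) :=
  (pvCells h w).foldl
    (fun s p =>
      if (p.1 = 0 ∨ p.1 = h - 1 ∨ p.2 = 0 ∨ p.2 = w - 1) ∧ pvAt g p.1 p.2 = 0
      then insert p s else s)
    ∅

-- the per-cell test of B's sweep, in Python's evaluation order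
abbrev pvBCond (g : List (List Int)) (h w : ℕ) (e : Finset (ℕ × ℕ)) (p : ℕ × ℕ) : Prop :=
  pvAt g p.1 p.2 = 0 ∧ p ∉ e ∧
    ((0 < p.1 ∧ (p.1 - 1, p.2) ∈ e) ∨ (p.1 + 1 < h ∧ (p.1 + 1, p.2) ∈ e) ∨
     (0 < p.2 ∧ (p.1, p.2 - 1) ∈ e) ∨ (p.2 + 1 < w ∧ (p.1, p.2 + 1) ∈ e))

def pvBStep (g : List (List Int)) (h w : ℕ) (s : Finset (ℕ × ℕ) × Bool) (p : ℕ × ℕ) :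
    Finset (ℕ × ℕ) × Bool :=
  if pvBCond g h w s.1 p then (insert p s.1, true) else s

-- one whole-grid sweep ('for r in range(h): for c in range(w): …'), with the changed flag
def pvBSweep (g : List (List Int)) (h w : ℕ) (e : Finset (ℕ × ℕ)) : Finset (ℕ × ℕ) × Bool :=
  (pvCells h w).foldl (pvBStep g h w) (e, false)

-- termination fact for the 'while changed:' loop (cited in decreasing_by)
theorem pvBSweep_card (g : List (List Int)) (h w : ℕ) (e : Finset (ℕ × ℕ))
    (hc : (pvBSweep g h w e).2 = true) :
    (pvBox h w \ (pvBSweep g h w e).1).card < (pvBox h w \ e).card := by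
  have hsub : ∀ (l : List (ℕ × ℕ)) (s : Finset (ℕ × ℕ) × Bool),
      s.1 ⊆ (l.foldl (pvBStep g h w) s).1 := by
    intro l
    induction l with
    | nil => intro s; exact Finset.Subset.refl _
    | cons p l ih =>
      intro s
      refine Finset.Subset.trans ?_ (ih (pvBStep g h w s p))
      unfold pvBStep
      split
      · exact Finset.subset_insert _ _
      · exact Finset.Subset.refl _
  have hbox : ∀ (l : List (ℕ × ℕ)) (s : Finset (ℕ × ℕ) × Bool),
      (∀ p ∈ l, p ∈ pvBox h w) → (l.foldl (pvBStep g h w) s).1 ⊆ s.1 ∪ pvBox h w := by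
    intro l
    induction l with
    | nil => intro s _; exact Finset.subset_union_left
    | cons p l ih =>
      intro s hl
      refine Finset.Subset.trans
        (ih (pvBStep g h w s p) (fun q hq => hl q (List.mem_cons_of_mem _ hq))) ?_
      have hstep : (pvBStep g h w s p).1 ⊆ s.1 ∪ pvBox h w := by
        unfold pvBStep
        split
        · intro q hq
          rcases Finset.mem_insert.mp hq with rfl | hq
          · exact Finset.mem_union_right _ (hl q List.mem_cons_self)
          · exact Finset.mem_union_left _ hq
        · exact Finset.subset_union_left
      exact Finset.union_subset hstep Finset.subset_union_right
  have hgrow : ∀ (l : List (ℕ × ℕ)) (s : Finset (ℕ × ℕ) × Bool),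
      s.2 = false → (l.foldl (pvBStep g h w) s).2 = true → s.1 ⊂ (l.foldl (pvBStep g h w) s).1 := by
    intro l
    induction l with
    | nil => intro s h0 ht; rw [List.foldl_nil, h0] at ht; cases ht
    | cons p l ih =>
      intro s h0 ht
      rw [List.foldl_cons] at ht ⊢
      by_cases hcnd : pvBCond g h w s.1 p
      · have hstep : pvBStep g h w s p = (insert p s.1, true) := by
          unfold pvBStep; rw [if_pos hcnd]
        rw [hstep] at ht ⊢
        exact Finset.ssubset_of_ssubset_of_subset (Finset.ssubset_insert hcnd.2.1) (hsub l (insert p s.1, true))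
      · have hstep : pvBStep g h w s p = s := by
          unfold pvBStep; rw [if_neg hcnd]
        rw [hstep] at ht ⊢
        exact ih s h0 ht
  have hcells : ∀ p ∈ pvCells h w, p ∈ pvBox h w := by
    intro p hp
    unfold pvCells at hp
    simp only [List.mem_flatMap, List.mem_map, List.mem_range] at hp
    obtain ⟨r, hr, c, hcw, rfl⟩ := hp
    simp only [pvBox, Finset.mem_product, Finset.mem_range]
    exact ⟨hr, hcw⟩
  unfold pvBSweep at hc ⊢
  have hg : e ⊂ ((pvCells h w).foldl (pvBStep g h w) (e, false)).1 :=
    hgrow (pvCells h w) (e, false) rfl hc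
  have hb : ((pvCells h w).foldl (pvBStep g h w) (e, false)).1 ⊆ e ∪ pvBox h w :=
    hbox (pvCells h w) (e, false) hcells
  apply Finset.card_lt_card
  rw [Finset.ssubset_iff_of_subset (Finset.sdiff_subset_sdiff (Finset.Subset.refl _) hg.subset)]
  obtain ⟨x, hxF, hxe⟩ := Finset.exists_of_ssubset hg
  refine ⟨x, Finset.mem_sdiff.mpr ⟨?_, hxe⟩, fun hx => (Finset.mem_sdiff.mp hx).2 hxF⟩
  rcases Finset.mem_union.mp (hb hxF) with hx | hx
  · exact absurd hx hxe
  · exact hx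

-- B's 'while changed:' saturation loop
def pvBLoop (g : List (List Int)) (h w : ℕ) (e : Finset (ℕ × ℕ)) : Finset (ℕ × ℕ) :=
  let s := pvBSweep g h w e
  if hc : s.2 then pvBLoop g h w s.1 else s.1
termination_by (pvBox h w \ e).card
decreasing_by
  exact pvBSweep_card g h w e hc

-- B's counting loop: counts[v] = counts.get(v, 0) + 1 over the cells, row-major
def pvBCounts (g : List (List Int)) (h w : ℕ) : PySem.Dict Int Int :=
  (pvCells h w).foldl
    (fun d p =>
      if pvAt g p.1 p.2 ≠ 0 then d.insert (pvAt g p.1 p.2) (d.getD (pvAt g p.1 p.2) 0 + 1)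
      else d)
    PySem.Dict.empty

def fill_interior_alt (grid : List (List Int)) : List (List Int) :=
  if grid = [] ∨ grid.headD [] = [] then grid
  else
    let h := grid.length
    let w := (grid.headD []).length
    let ext := pvBLoop grid h w (pvBSeed grid h w)
    let counts := pvBCounts grid h w
    -- max(counts, key=counts.get) if counts else 1  (max = first key with maximal count)
    let fill : Int :=
      if counts.keys ≠ [] then
        (PySem.List.max? counts.keys (fun k => counts.getD k 0)).getD 1
      else 1
    pvWrite grid h w ext fill

-- ===== PRECONDITION & SPEC =====
-- Pre_ excludes exactly the grids on which Python A raises IndexError: a nonempty grid with a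
-- nonempty first row in which some row is shorter than the first row (the loops index every
-- row at columns 0..len(grid[0])-1).
def Pre_fill_interior (grid : List (List Int)) : Prop :=
  ∀ row ∈ grid, (grid.headD []).length ≤ row.length

instance (grid : List (List Int)) : Decidable (Pre_fill_interior grid) := by
  unfold Pre_fill_interior; infer_instance

def pvWitness_fill_interior : List (List Int) := [[2, 2, 2], [2, 0, 2], [2, 2, 2]]

def Spec_fill_interior (grid : List (List Int)) (out : List (List Int)) : Prop :=
  out = fill_interior_alt grid
instance (grid : List (List Int)) (out : List (List Int)) : Decidable (Spec_fill_interior grid out) := by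
  unfold Spec_fill_interior; infer_instance

-- ===== CLAIM (what is proved, stated in full; the proofs are below) =====
def Claim_equal_fill_interior : Prop :=
  ∀ (grid : List (List Int)), Dom_fill_interior grid → Pre_fill_interior grid →
    Spec_fill_interior grid (fill_interior grid)

-- ===== LEMMAS AND PROOFS =====

-- membership in the cell list / box
theorem mem_pvCells (h w : ℕ) (p : ℕ × ℕ) : p ∈ pvCells h w ↔ p.1 < h ∧ p.2 < w := by
  unfold pvCells
  simp only [List.mem_flatMap, List.mem_map, List.mem_range]
  constructor
  · rintro ⟨r, hr, c, hc, rfl⟩; exact ⟨hr, hc⟩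
  · rintro ⟨h1, h2⟩; exact ⟨p.1, h1, p.2, h2, rfl⟩

theorem pvBFold_sub (g : List (List Int)) (h w : ℕ) (l : List (ℕ × ℕ))
    (s : Finset (ℕ × ℕ) × Bool) : s.1 ⊆ (l.foldl (pvBStep g h w) s).1 := by
  induction l generalizing s with
  | nil => exact Finset.Subset.refl _
  | cons p l ih =>
    refine Finset.Subset.trans ?_ (ih (pvBStep g h w s p))
    unfold pvBStep
    split
    · exact Finset.subset_insert _ _
    · exact Finset.Subset.refl _

theorem pvBFold_flag (g : List (List Int)) (h w : ℕ) (l : List (ℕ × ℕ))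
    (s : Finset (ℕ × ℕ) × Bool) (hs : s.2 = true) : (l.foldl (pvBStep g h w) s).2 = true := by
  induction l generalizing s with
  | nil => exact hs
  | cons p l ih =>
    refine ih (pvBStep g h w s p) ?_
    unfold pvBStep
    split
    · rfl
    · exact hs

-- 4-adjacency and reachability from the border through background cells
def pvAdj (p q : ℕ × ℕ) : Prop :=
  (p.1 = q.1 ∧ (p.2 + 1 = q.2 ∨ q.2 + 1 = p.2)) ∨
  (p.2 = q.2 ∧ (p.1 + 1 = q.1 ∨ q.1 + 1 = p.1))

inductive pvReach (g : List (List Int)) (h w : ℕ) : ℕ × ℕ → Prop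
  | seed (p : ℕ × ℕ) : p.1 < h → p.2 < w → (p.1 = 0 ∨ p.1 = h - 1 ∨ p.2 = 0 ∨ p.2 = w - 1) →
      pvAt g p.1 p.2 = 0 → pvReach g h w p
  | step (p q : ℕ × ℕ) : pvReach g h w p → pvAdj p q → q.1 < h → q.2 < w →
      pvAt g q.1 q.2 = 0 → pvReach g h w q

theorem pvReach_lt (g : List (List Int)) (h w : ℕ) (p : ℕ × ℕ) (hr : pvReach g h w p) :
    p.1 < h ∧ p.2 < w := by
  cases hr <;> exact ⟨by assumption, by assumption⟩

-- generic lemmas about the seed folds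
theorem foldl_insert_filter {α : Type} [DecidableEq α] (C : α → Prop) [DecidablePred C]
    (l : List α) : ∀ (e : Finset α) (p : α),
    (p ∈ l.foldl (fun s q => if C q then insert q s else s) e) ↔ p ∈ e ∨ (p ∈ l ∧ C p) := by
  induction l with
  | nil => intro e p; simp
  | cons a l ih =>
    intro e p
    rw [List.foldl_cons]
    by_cases hC : C a
    · rw [if_pos hC, ih]
      by_cases hpa : p = a
      · subst hpa; simp [hC]
      · simp [hpa, Finset.mem_insert]
    · rw [if_neg hC, ih]
      constructor
      · rintro (he | ⟨hm, hc2⟩)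
        · exact Or.inl he
        · exact Or.inr ⟨List.mem_cons_of_mem _ hm, hc2⟩
      · rintro (he | ⟨hm, hc2⟩)
        · exact Or.inl he
        · rcases List.mem_cons.mp hm with rfl | hm
          · exact absurd hc2 hC
          · exact Or.inr ⟨hm, hc2⟩

theorem foldl_pair_fst (C : ℕ × ℕ → Prop) [DecidablePred C] (l : List (ℕ × ℕ)) :
    ∀ (e : Finset (ℕ × ℕ)) (st : List (ℕ × ℕ)),
    (l.foldl (fun s q => if C q then (insert q s.1, q :: s.2) else s) (e, st)).1
      = l.foldl (fun s q => if C q then insert q s else s) e := by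
  induction l with
  | nil => intro e st; rfl
  | cons a l ih =>
    intro e st
    rw [List.foldl_cons, List.foldl_cons]
    by_cases hC : C a
    · rw [if_pos hC, if_pos hC]; exact ih _ _
    · rw [if_neg hC, if_neg hC]; exact ih _ _

theorem foldl_pair_iff (C : ℕ × ℕ → Prop) [DecidablePred C] (l : List (ℕ × ℕ)) :
    ∀ (e : Finset (ℕ × ℕ)) (st : List (ℕ × ℕ)), (∀ p, p ∈ e ↔ p ∈ st) →
    ∀ p, p ∈ (l.foldl (fun s q => if C q then (insert q s.1, q :: s.2) else s) (e, st)).1 ↔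
         p ∈ (l.foldl (fun s q => if C q then (insert q s.1, q :: s.2) else s) (e, st)).2 := by
  induction l with
  | nil => intro e st hinv p; exact hinv p
  | cons a l ih =>
    intro e st hinv p
    rw [List.foldl_cons]
    by_cases hC : C a
    · rw [if_pos hC]
      exact ih _ _ (fun q => by
        simp only [Finset.mem_insert, List.mem_cons]
        rw [hinv q]) p
    · rw [if_neg hC]; exact ih _ _ hinv p

theorem pvASeed_fst (g : List (List Int)) (h w : ℕ) : (pvASeed g h w).1 = pvBSeed g h w := by
  unfold pvASeed pvBSeed
  exact foldl_pair_fst _ _ ∅ []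

theorem pvBSeed_mem (g : List (List Int)) (h w : ℕ) (p : ℕ × ℕ) :
    p ∈ pvBSeed g h w ↔ (p.1 < h ∧ p.2 < w) ∧
      ((p.1 = 0 ∨ p.1 = h - 1 ∨ p.2 = 0 ∨ p.2 = w - 1) ∧ pvAt g p.1 p.2 = 0) := by
  unfold pvBSeed
  rw [foldl_insert_filter]
  rw [mem_pvCells]
  simp

theorem pvASeed_inv (g : List (List Int)) (h w : ℕ) (p : ℕ × ℕ) :
    p ∈ (pvASeed g h w).1 ↔ p ∈ (pvASeed g h w).2 := by
  unfold pvASeed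
  exact foldl_pair_iff _ _ ∅ [] (fun q => by simp) p

-- the four directions of A's inner loop
def pvDirs : List (Int × Int) := [((0 : Int), (1 : Int)), (0, -1), (1, 0), (-1, 0)]

theorem pvAdj_of_dir (r c : ℕ) (d : Int × Int) (hd : d ∈ pvDirs)
    (h1 : 0 ≤ (r : Int) + d.1) (h3 : 0 ≤ (c : Int) + d.2) :
    pvAdj (r, c) (((r : Int) + d.1).toNat, ((c : Int) + d.2).toNat) := by
  unfold pvDirs at hd
  simp only [List.mem_cons, List.mem_singleton, List.not_mem_nil, or_false] at hd
  unfold pvAdj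
  rcases hd with rfl | rfl | rfl | rfl
  all_goals simp
  all_goals omega

theorem pvAdj_cases (r c : ℕ) (q : ℕ × ℕ) (ha : pvAdj (r, c) q) :
    ∃ d ∈ pvDirs, 0 ≤ (r : Int) + d.1 ∧ 0 ≤ (c : Int) + d.2 ∧
      q = (((r : Int) + d.1).toNat, ((c : Int) + d.2).toNat) := by
  obtain ⟨q1, q2⟩ := q
  unfold pvAdj at ha
  simp only at ha
  rcases ha with ⟨h1, h2 | h2⟩ | ⟨h1, h2 | h2⟩
  · exact ⟨(0, 1), by simp [pvDirs], by omega, by omega, by simp [Prod.ext_iff]; omega⟩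
  · exact ⟨(0, -1), by simp [pvDirs], by omega, by omega, by simp [Prod.ext_iff]; omega⟩
  · exact ⟨(1, 0), by simp [pvDirs], by omega, by omega, by simp [Prod.ext_iff]; omega⟩
  · exact ⟨(-1, 0), by simp [pvDirs], by omega, by omega, by simp [Prod.ext_iff]; omega⟩

-- case analysis on one neighbour step of A
theorem pvAStep_cases (g : List (List Int)) (h w r c : ℕ)
    (s : Finset (ℕ × ℕ) × List (ℕ × ℕ)) (d : Int × Int) :
    ((0 ≤ (r : Int) + d.1 ∧ (r : Int) + d.1 < (h : Int) ∧ 0 ≤ (c : Int) + d.2 ∧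
        (c : Int) + d.2 < (w : Int) ∧ (((r : Int) + d.1).toNat, ((c : Int) + d.2).toNat) ∉ s.1 ∧
        pvAt g ((r : Int) + d.1).toNat ((c : Int) + d.2).toNat = 0) ∧
      pvAStep g h w r c s d =
        (insert (((r : Int) + d.1).toNat, ((c : Int) + d.2).toNat) s.1,
         (((r : Int) + d.1).toNat, ((c : Int) + d.2).toNat) :: s.2)) ∨
    (¬ (0 ≤ (r : Int) + d.1 ∧ (r : Int) + d.1 < (h : Int) ∧ 0 ≤ (c : Int) + d.2 ∧
        (c : Int) + d.2 < (w : Int) ∧ (((r : Int) + d.1).toNat, ((c : Int) + d.2).toNat) ∉ s.1 ∧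
        pvAt g ((r : Int) + d.1).toNat ((c : Int) + d.2).toNat = 0) ∧
      pvAStep g h w r c s d = s) := by
  by_cases hcond : (0 ≤ (r : Int) + d.1 ∧ (r : Int) + d.1 < (h : Int) ∧ 0 ≤ (c : Int) + d.2 ∧
      (c : Int) + d.2 < (w : Int) ∧ (((r : Int) + d.1).toNat, ((c : Int) + d.2).toNat) ∉ s.1 ∧
      pvAt g ((r : Int) + d.1).toNat ((c : Int) + d.2).toNat = 0)
  · exact Or.inl ⟨hcond, by simp only [pvAStep]; rw [if_pos hcond]⟩
  · exact Or.inr ⟨hcond, by simp only [pvAStep]; rw [if_neg hcond]⟩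

theorem pvAFold_fst_mono (g : List (List Int)) (h w r c : ℕ) (ds : List (Int × Int)) :
    ∀ s, s.1 ⊆ (ds.foldl (pvAStep g h w r c) s).1 := by
  induction ds with
  | nil => intro s; exact Finset.Subset.refl _
  | cons d ds ih =>
    intro s
    refine Finset.Subset.trans ?_ (ih (pvAStep g h w r c s d))
    rcases pvAStep_cases g h w r c s d with ⟨-, heq⟩ | ⟨-, heq⟩ <;> rw [heq]
    exact Finset.subset_insert _ _

theorem pvAFold_stack_mono (g : List (List Int)) (h w r c : ℕ) (ds : List (Int × Int)) :
    ∀ s p, p ∈ s.2 → p ∈ (ds.foldl (pvAStep g h w r c) s).2 := by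
  induction ds with
  | nil => intro s p hp; exact hp
  | cons d ds ih =>
    intro s p hp
    refine ih (pvAStep g h w r c s d) p ?_
    rcases pvAStep_cases g h w r c s d with ⟨-, heq⟩ | ⟨-, heq⟩ <;> rw [heq]
    · exact List.mem_cons_of_mem _ hp
    · exact hp

theorem pvAFold_stack_sub (g : List (List Int)) (h w r c : ℕ) (ds : List (Int × Int)) :
    ∀ s, (∀ p ∈ s.2, p ∈ s.1) →
      ∀ p ∈ (ds.foldl (pvAStep g h w r c) s).2, p ∈ (ds.foldl (pvAStep g h w r c) s).1 := by
  induction ds with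
  | nil => intro s hs p hp; exact hs p hp
  | cons d ds ih =>
    intro s hs
    refine ih (pvAStep g h w r c s d) ?_
    rcases pvAStep_cases g h w r c s d with ⟨-, heq⟩ | ⟨-, heq⟩ <;> rw [heq]
    · intro p hp
      rcases List.mem_cons.mp hp with rfl | hp
      · exact Finset.mem_insert_self _ _
      · exact Finset.mem_insert_of_mem (hs p hp)
    · exact hs

theorem pvAFold_new (g : List (List Int)) (h w r c : ℕ) (ds : List (Int × Int))
    (hds : ∀ d ∈ ds, d ∈ pvDirs) :
    ∀ s p, p ∈ (ds.foldl (pvAStep g h w r c) s).1 →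
      p ∈ s.1 ∨ (pvAdj (r, c) p ∧ p.1 < h ∧ p.2 < w ∧ pvAt g p.1 p.2 = 0) := by
  induction ds with
  | nil => intro s p hp; exact Or.inl hp
  | cons d ds ih =>
    intro s p hp
    rw [List.foldl_cons] at hp
    rcases ih (fun d' hd' => hds d' (List.mem_cons_of_mem _ hd')) (pvAStep g h w r c s d) p hp with
      hp' | hnew
    · rcases pvAStep_cases g h w r c s d with ⟨hcond, heq⟩ | ⟨-, heq⟩
      · rw [heq] at hp'
        rcases Finset.mem_insert.mp hp' with rfl | hp'
        · obtain ⟨h1, h2, h3, h4, -, hbg⟩ := hcond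
          exact Or.inr ⟨pvAdj_of_dir r c d (hds d List.mem_cons_self) h1 h3,
            by omega, by omega, hbg⟩
        · exact Or.inl hp'
      · rw [heq] at hp'; exact Or.inl hp'
    · exact Or.inr hnew

theorem pvAFold_new_pushed (g : List (List Int)) (h w r c : ℕ) (ds : List (Int × Int)) :
    ∀ s p, p ∈ (ds.foldl (pvAStep g h w r c) s).1 →
      p ∈ s.1 ∨ p ∈ (ds.foldl (pvAStep g h w r c) s).2 := by
  induction ds with
  | nil => intro s p hp; exact Or.inl hp
  | cons d ds ih =>
    intro s p hp
    rw [List.foldl_cons] at hp ⊢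
    rcases ih (pvAStep g h w r c s d) p hp with hp' | hst
    · rcases pvAStep_cases g h w r c s d with ⟨-, heq⟩ | ⟨-, heq⟩
      · rw [heq] at hp'
        rcases Finset.mem_insert.mp hp' with rfl | hp'
        · refine Or.inr (pvAFold_stack_mono g h w r c ds _ _ ?_)
          rw [heq]; exact List.mem_cons_self
        · exact Or.inl hp'
      · rw [heq] at hp'; exact Or.inl hp'
    · exact Or.inr hst

theorem pvAFold_covers (g : List (List Int)) (h w r c : ℕ) (ds : List (Int × Int)) :
    ∀ s (d : Int × Int), d ∈ ds → 0 ≤ (r : Int) + d.1 → (r : Int) + d.1 < (h : Int) →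
      0 ≤ (c : Int) + d.2 → (c : Int) + d.2 < (w : Int) →
      pvAt g ((r : Int) + d.1).toNat ((c : Int) + d.2).toNat = 0 →
      (((r : Int) + d.1).toNat, ((c : Int) + d.2).toNat) ∈ (ds.foldl (pvAStep g h w r c) s).1 := by
  induction ds with
  | nil => intro s d hd; exact absurd hd (List.not_mem_nil)
  | cons d' ds ih =>
    intro s d hd hb1 hb2 hb3 hb4 hbg
    rw [List.foldl_cons]
    rcases List.mem_cons.mp hd with rfl | hd
    · rcases pvAStep_cases g h w r c s d with ⟨-, heq⟩ | ⟨hnc, heq⟩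
      · refine pvAFold_fst_mono g h w r c ds _ ?_
        rw [heq]; exact Finset.mem_insert_self _ _
      · have hmem : (((r : Int) + d.1).toNat, ((c : Int) + d.2).toNat) ∈ s.1 := by
          by_contra hq
          exact hnc ⟨hb1, hb2, hb3, hb4, hq, hbg⟩
        refine pvAFold_fst_mono g h w r c ds _ ?_
        rw [heq]; exact hmem
    · exact ih (pvAStep g h w r c s d') d hd hb1 hb2 hb3 hb4 hbg

theorem pvALoop_sub (g : List (List Int)) (h w : ℕ) :
    ∀ ext st, ext ⊆ pvALoop g h w ext st := by
  intro ext st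
  induction ext, st using pvALoop.induct g h w with
  | case1 ext => rw [pvALoop]
  | case2 ext r c rest s =>
    rename_i ih
    have hs : s = List.foldl (pvAStep g h w r c) (ext, rest)
        [((0 : Int), (1 : Int)), (0, -1), (1, 0), (-1, 0)] := rfl
    rw [pvALoop, ← hs]
    refine Finset.Subset.trans ?_ ih
    rw [hs]
    exact pvAFold_fst_mono g h w r c _ (ext, rest)

theorem pvALoop_sound (g : List (List Int)) (h w : ℕ) :
    ∀ ext st, (∀ p ∈ ext, pvReach g h w p) → (∀ p ∈ st, p ∈ ext) →
      ∀ p ∈ pvALoop g h w ext st, pvReach g h w p := by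
  intro ext st
  induction ext, st using pvALoop.induct g h w with
  | case1 ext =>
    intro H1 _ p hp
    rw [pvALoop] at hp
    exact H1 p hp
  | case2 ext r c rest s ih =>
    intro H1 H2 p hp
    have hs : s = List.foldl (pvAStep g h w r c) (ext, rest)
        [((0 : Int), (1 : Int)), (0, -1), (1, 0), (-1, 0)] := rfl
    rw [pvALoop, ← hs] at hp
    refine ih ?_ ?_ p hp
    · intro q hq
      rw [hs] at hq
      rcases pvAFold_new g h w r c _ (fun d hd => hd) (ext, rest) q hq with hq' | ⟨hadj, hb1, hb2, hbg⟩
      · exact H1 q hq'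
      · exact pvReach.step (r, c) q (H1 (r, c) (H2 _ List.mem_cons_self)) hadj hb1 hb2 hbg
    · rw [hs]
      exact pvAFold_stack_sub g h w r c _ (ext, rest)
        (fun q hq => H2 q (List.mem_cons_of_mem _ hq))

theorem pvALoop_closed (g : List (List Int)) (h w : ℕ) :
    ∀ ext st, (∀ p ∈ st, p ∈ ext) →
      (∀ p ∈ ext, p ∉ st → ∀ q, pvAdj p q → q.1 < h → q.2 < w → pvAt g q.1 q.2 = 0 → q ∈ ext) →
      ∀ p ∈ pvALoop g h w ext st, ∀ q, pvAdj p q → q.1 < h → q.2 < w → pvAt g q.1 q.2 = 0 →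
        q ∈ pvALoop g h w ext st := by
  intro ext st
  induction ext, st using pvALoop.induct g h w with
  | case1 ext =>
    intro _ H3 p hp q hadj hq1 hq2 hbg
    rw [pvALoop] at hp ⊢
    exact H3 p hp (List.not_mem_nil) q hadj hq1 hq2 hbg
  | case2 ext r c rest s ih =>
    intro H2 H3 p hp q hadj hq1 hq2 hbg
    have hs : s = List.foldl (pvAStep g h w r c) (ext, rest)
        [((0 : Int), (1 : Int)), (0, -1), (1, 0), (-1, 0)] := rfl
    rw [pvALoop, ← hs] at hp ⊢
    refine ih ?_ ?_ p hp q hadj hq1 hq2 hbg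
    · rw [hs]
      exact pvAFold_stack_sub g h w r c _ (ext, rest)
        (fun q' hq' => H2 q' (List.mem_cons_of_mem _ hq'))
    · intro p' hp' hpst q' hadj' hq1' hq2' hbg'
      rw [hs] at hp' hpst ⊢
      by_cases hpc : p' = (r, c)
      · subst hpc
        obtain ⟨d, hd, hd1, hd3, rfl⟩ := pvAdj_cases r c q' hadj'
        simp only at hq1' hq2'
        exact pvAFold_covers g h w r c _ (ext, rest) d hd hd1 (by omega) hd3 (by omega) hbg'
      · rcases pvAFold_new_pushed g h w r c _ (ext, rest) p' hp' with hpe | hps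
        · have hnr : p' ∉ rest := fun hr =>
            hpst (pvAFold_stack_mono g h w r c _ (ext, rest) p' hr)
          refine pvAFold_fst_mono g h w r c _ (ext, rest) (H3 p' hpe ?_ q' hadj' hq1' hq2' hbg')
          intro hmem
          rcases List.mem_cons.mp hmem with h' | h'
          · exact hpc h'
          · exact hnr h'
        · exact absurd hps hpst

theorem pvAExt_iff (g : List (List Int)) (h w : ℕ) (p : ℕ × ℕ) :
    p ∈ pvALoop g h w (pvASeed g h w).1 (pvASeed g h w).2 ↔ pvReach g h w p := by
  constructor
  · refine pvALoop_sound g h w _ _ ?_ ?_ p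
    · intro q hq
      rw [pvASeed_fst, pvBSeed_mem] at hq
      exact pvReach.seed q hq.1.1 hq.1.2 hq.2.1 hq.2.2
    · intro q hq
      exact (pvASeed_inv g h w q).mpr hq
  · intro hr
    induction hr with
    | seed p h1 h2 he hbg =>
      refine pvALoop_sub g h w _ _ ?_
      rw [pvASeed_fst, pvBSeed_mem]
      exact ⟨⟨h1, h2⟩, he, hbg⟩
    | step p q hp hadj h1 h2 hbg ih =>
      refine pvALoop_closed g h w _ _ ?_ ?_ p ih q hadj h1 h2 hbg
      · intro q' hq'
        exact (pvASeed_inv g h w q').mpr hq'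
      · intro p' hp' hps
        exact (hps ((pvASeed_inv g h w p').mp hp')).elim

-- B-side lemmas
theorem pvBFold_sound (g : List (List Int)) (h w : ℕ) (l : List (ℕ × ℕ))
    (hl : ∀ p ∈ l, p.1 < h ∧ p.2 < w) :
    ∀ s, (∀ p ∈ s.1, pvReach g h w p) → ∀ p ∈ (l.foldl (pvBStep g h w) s).1, pvReach g h w p := by
  induction l with
  | nil => intro s hs p hp; exact hs p hp
  | cons a l ih =>
    intro s hs p hp
    rw [List.foldl_cons] at hp
    refine ih (fun q hq => hl q (List.mem_cons_of_mem _ hq)) (pvBStep g h w s a) ?_ p hp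
    intro q hq
    by_cases hc : pvBCond g h w s.1 a
    · have hstep : pvBStep g h w s a = (insert a s.1, true) := by
        unfold pvBStep; rw [if_pos hc]
      rw [hstep] at hq
      rcases Finset.mem_insert.mp hq with rfl | hq
      · obtain ⟨hbg, -, hnb⟩ := hc
        obtain ⟨ha1, ha2⟩ := hl q List.mem_cons_self
        obtain ⟨q1, q2⟩ := q
        rcases hnb with ⟨hgt, hm⟩ | ⟨hlt, hm⟩ | ⟨hgt, hm⟩ | ⟨hlt, hm⟩
        · exact pvReach.step _ _ (hs _ hm)
            (Or.inr ⟨rfl, Or.inl (show q1 - 1 + 1 = q1 by omega)⟩) ha1 ha2 hbg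
        · exact pvReach.step _ _ (hs _ hm) (Or.inr ⟨rfl, Or.inr rfl⟩) ha1 ha2 hbg
        · exact pvReach.step _ _ (hs _ hm)
            (Or.inl ⟨rfl, Or.inl (show q2 - 1 + 1 = q2 by omega)⟩) ha1 ha2 hbg
        · exact pvReach.step _ _ (hs _ hm) (Or.inl ⟨rfl, Or.inr rfl⟩) ha1 ha2 hbg
      · exact hs q hq
    · have hstep : pvBStep g h w s a = s := by
        unfold pvBStep; rw [if_neg hc]
      rw [hstep] at hq
      exact hs q hq

theorem pvBFold_false (g : List (List Int)) (h w : ℕ) (l : List (ℕ × ℕ)) :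
    ∀ s, (l.foldl (pvBStep g h w) s).2 = false →
      l.foldl (pvBStep g h w) s = s ∧ ∀ p ∈ l, ¬ pvBCond g h w s.1 p := by
  induction l with
  | nil => intro s _; exact ⟨rfl, by simp⟩
  | cons a l ih =>
    intro s hf
    rw [List.foldl_cons] at hf
    by_cases hc : pvBCond g h w s.1 a
    · have hstep : pvBStep g h w s a = (insert a s.1, true) := by
        unfold pvBStep; rw [if_pos hc]
      rw [hstep] at hf
      have := pvBFold_flag g h w l (insert a s.1, true) rfl
      rw [this] at hf
      cases hf
    · have hstep : pvBStep g h w s a = s := by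
        unfold pvBStep; rw [if_neg hc]
      rw [hstep] at hf
      obtain ⟨heq, hall⟩ := ih s hf
      refine ⟨by rw [List.foldl_cons, hstep, heq], ?_⟩
      intro p hp
      rcases List.mem_cons.mp hp with rfl | hp
      · exact hc
      · exact hall p hp

theorem pvBLoop_sub (g : List (List Int)) (h w : ℕ) :
    ∀ e, e ⊆ pvBLoop g h w e := by
  intro e
  induction e using pvBLoop.induct g h w with
  | case1 e s hc =>
    rename_i ih
    rw [pvBLoop, dif_pos hc]
    exact Finset.Subset.trans (pvBFold_sub g h w _ (e, false)) ih
  | case2 e s =>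
    rename_i hc
    rw [pvBLoop, dif_neg hc]
    exact pvBFold_sub g h w _ (e, false)

theorem pvBLoop_sound (g : List (List Int)) (h w : ℕ) :
    ∀ e, (∀ p ∈ e, pvReach g h w p) → ∀ p ∈ pvBLoop g h w e, pvReach g h w p := by
  intro e
  induction e using pvBLoop.induct g h w with
  | case1 e s hc =>
    rename_i ih
    intro he p hp
    rw [pvBLoop, dif_pos hc] at hp
    exact ih (pvBFold_sound g h w _ (fun q hq => (mem_pvCells h w q).mp hq) (e, false) he) p hp
  | case2 e s =>
    rename_i hc
    intro he p hp
    rw [pvBLoop, dif_neg hc] at hp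
    exact pvBFold_sound g h w _ (fun q hq => (mem_pvCells h w q).mp hq) (e, false) he p hp

theorem pvBLoop_fix (g : List (List Int)) (h w : ℕ) :
    ∀ e p, p ∈ pvCells h w → ¬ pvBCond g h w (pvBLoop g h w e) p := by
  intro e
  induction e using pvBLoop.induct g h w with
  | case1 e s hc =>
    rename_i ih
    intro p hp
    rw [pvBLoop, dif_pos hc]
    exact ih p hp
  | case2 e s =>
    rename_i hc
    intro p hp
    rw [pvBLoop, dif_neg hc]
    rw [Bool.not_eq_true] at hc
    have hfalse : ((pvCells h w).foldl (pvBStep g h w) (e, false)).2 = false := hc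
    obtain ⟨heq, hall⟩ := pvBFold_false g h w (pvCells h w) (e, false) hfalse
    show ¬ pvBCond g h w ((pvCells h w).foldl (pvBStep g h w) (e, false)).1 p
    rw [heq]
    exact hall p hp

theorem pvBExt_iff (g : List (List Int)) (h w : ℕ) (p : ℕ × ℕ) :
    p ∈ pvBLoop g h w (pvBSeed g h w) ↔ pvReach g h w p := by
  constructor
  · refine pvBLoop_sound g h w _ ?_ p
    intro q hq
    rw [pvBSeed_mem] at hq
    exact pvReach.seed q hq.1.1 hq.1.2 hq.2.1 hq.2.2
  · intro hr
    induction hr with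
    | seed p h1 h2 he hbg =>
      refine pvBLoop_sub g h w _ ?_
      rw [pvBSeed_mem]
      exact ⟨⟨h1, h2⟩, he, hbg⟩
    | step p q hp hadj h1 h2 hbg ih =>
      by_contra hq
      refine pvBLoop_fix g h w (pvBSeed g h w) q ((mem_pvCells h w q).mpr ⟨h1, h2⟩) ?_
      refine ⟨hbg, hq, ?_⟩
      obtain ⟨hp1, hp2⟩ := pvReach_lt g h w p hp
      obtain ⟨p1, p2⟩ := p
      obtain ⟨q1, q2⟩ := q
      unfold pvAdj at hadj
      simp only at hadj hp1 hp2
      rcases hadj with ⟨e1, e2 | e2⟩ | ⟨e1, e2 | e2⟩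
      · refine Or.inr (Or.inr (Or.inl ⟨by omega, ?_⟩))
        have hpe : (q1, q2 - 1) = (p1, p2) := by simp [Prod.ext_iff]; omega
        rw [hpe]; exact ih
      · refine Or.inr (Or.inr (Or.inr ⟨by omega, ?_⟩))
        have hpe : (q1, q2 + 1) = (p1, p2) := by simp [Prod.ext_iff]; omega
        rw [hpe]; exact ih
      · refine Or.inl ⟨by omega, ?_⟩
        have hpe : (q1 - 1, q2) = (p1, p2) := by simp [Prod.ext_iff]; omega
        rw [hpe]; exact ih
      · refine Or.inr (Or.inl ⟨by omega, ?_⟩)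
        have hpe : (q1 + 1, q2) = (p1, p2) := by simp [Prod.ext_iff]; omega
        rw [hpe]; exact ih

theorem pvExt_eq (g : List (List Int)) (h w : ℕ) :
    pvALoop g h w (pvASeed g h w).1 (pvASeed g h w).2 = pvBLoop g h w (pvBSeed g h w) :=
  Finset.ext fun p => (pvAExt_iff g h w p).trans (pvBExt_iff g h w p).symm

-- the row-major list of non-zero colours (A's comprehension, named for the proofs)
def pvColors (g : List (List Int)) (h w : ℕ) : List Int :=
  (List.range h).flatMap
    (fun r => (List.range w).filterMap
      (fun c => if pvAt g r c ≠ 0 then some (pvAt g r c) else none))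

-- head of Python's reverse=True stable sort = first maximum (Counter.most_common(1) vs max(key=...))
theorem head?_insertBy_cons {α : Type} (before : α → α → Bool) (x y : α) (ys : List α) :
    (PySem.List.insertBy before x (y :: ys)).head? = some (if before x y then x else y) := by
  show (if before x y then x :: y :: ys else y :: PySem.List.insertBy before x ys).head? = _
  split <;> rfl

theorem sorted_rev_head {α : Type} (key : α → Int) :
    ∀ (xs : List α) (acc : List α),
      (xs.foldl (fun a x => PySem.List.insertBy (fun a b => decide (key b < key a)) x a) acc).head? =
      xs.foldl (fun m x => match m with
        | none => some x
        | some m => if key m < key x then some x else some m) acc.head? := by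
  intro xs
  induction xs with
  | nil => intro acc; rfl
  | cons x xs ih =>
    intro acc
    rw [List.foldl_cons, List.foldl_cons, ih]
    congr 1
    cases acc with
    | nil => rfl
    | cons y ys =>
      rw [head?_insertBy_cons]
      by_cases hk : key y < key x
      · simp [hk]
      · simp [hk]

theorem head?_sorted_rev {α : Type} (xs : List α) (key : α → Int) :
    (PySem.List.sorted xs key true).head? = PySem.List.max? xs key := by
  exact sorted_rev_head key xs []

theorem max?_map_aux {α β : Type} (f : α → β) (key : β → Int) :
    ∀ (xs : List α) (acc : Option α),
      ((xs.map f).foldl (fun m y => match m with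
          | none => some y
          | some m => if key m < key y then some y else some m) (acc.map f)) =
      (xs.foldl (fun m x => match m with
          | none => some x
          | some m => if key (f m) < key (f x) then some x else some m) acc).map f := by
  intro xs
  induction xs with
  | nil => intro acc; rfl
  | cons x xs ih =>
    intro acc
    rw [List.map_cons, List.foldl_cons, List.foldl_cons]
    have hstep : (match acc.map f with
        | none => some (f x)
        | some m => if key m < key (f x) then some (f x) else some m) =
      (match acc with
        | none => some x
        | some m => if key (f m) < key (f x) then some x else some m).map f := by
      cases acc with
      | none => rfl
      | some m =>
        show (if key (f m) < key (f x) then some (f x) else some (f m)) = _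
        by_cases hk : key (f m) < key (f x)
        · simp [hk]
        · simp [hk]
    rw [hstep]
    exact ih _

theorem max?_map {α β : Type} (xs : List α) (f : α → β) (key : β → Int) :
    PySem.List.max? (xs.map f) key = (PySem.List.max? xs (fun a => key (f a))).map f :=
  max?_map_aux f key xs none

-- B's counting loop over cells = Counter of A's colour list
theorem counts_inner (g : List (List Int)) (r : ℕ) :
    ∀ (l : List ℕ) (d : PySem.Dict Int Int),
      ((l.map (fun c => (r, c))).foldl
        (fun d p => if pvAt g p.1 p.2 ≠ 0 then
            d.insert (pvAt g p.1 p.2) (d.getD (pvAt g p.1 p.2) 0 + 1) else d) d) =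
      ((l.filterMap (fun c => if pvAt g r c ≠ 0 then some (pvAt g r c) else none)).foldl
        (fun d x => d.insert x (d.getD x 0 + 1)) d) := by
  intro l
  induction l with
  | nil => intro d; rfl
  | cons c l ih =>
    intro d
    simp only [List.map_cons, List.foldl_cons, List.filterMap_cons]
    by_cases hc : pvAt g r c ≠ 0
    · rw [if_pos hc, if_pos hc]
      simp only [List.foldl_cons]
      exact ih _
    · rw [if_neg hc, if_neg hc]
      exact ih _

theorem pvBCounts_eq (g : List (List Int)) (h w : ℕ) :
    pvBCounts g h w = PySem.Dict.counter (pvColors g h w) := by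
  unfold pvBCounts pvColors pvCells
  rw [← PySem.Dict.foldl_insert_getD_add_one_eq_counter]
  rw [List.foldl_flatMap, List.foldl_flatMap]
  congr 1
  funext d r
  exact counts_inner g r (List.range w) d

theorem ofList_ne_nil {xs : List Int} (hx : xs ≠ []) : PySem.Set.ofList xs ≠ [] := by
  cases xs with
  | nil => exact absurd rfl hx
  | cons x t =>
    exact List.ne_nil_of_mem ((PySem.Set.mem_ofList _ _).mpr List.mem_cons_self)

theorem headD_eq_head?_getD {α : Type} (l : List α) (d : α) : l.headD d = l.head?.getD d := by
  cases l <;> rfl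

theorem pvFill_eq (g : List (List Int)) (h w : ℕ) :
    (if pvColors g h w ≠ [] then
        ((PySem.List.sorted (PySem.Dict.counter (pvColors g h w)).items
          (fun p => p.2) true).headD (0, 0)).1
      else 1)
    = (if (pvBCounts g h w).keys ≠ [] then
        (PySem.List.max? (pvBCounts g h w).keys (fun k => (pvBCounts g h w).getD k 0)).getD 1
      else 1) := by
  rw [pvBCounts_eq, PySem.Dict.keys_counter]
  by_cases hc : pvColors g h w = []
  · rw [hc]
    rfl
  · rw [if_pos hc, if_pos (ofList_ne_nil hc)]
    rw [headD_eq_head?_getD, head?_sorted_rev, PySem.Dict.items_counter, max?_map]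
    have hkey : (fun k => (PySem.Dict.counter (pvColors g h w)).getD k 0) =
        (fun k => (((pvColors g h w).count k : Int))) := by
      funext k
      exact PySem.Dict.getD_counter _ k
    rw [hkey]
    show (((PySem.List.max? (PySem.Set.ofList (pvColors g h w))
        (fun a => (((pvColors g h w).count a : Int)))).map
        (fun k => (k, (((pvColors g h w).count k : Int))))).getD (0, 0)).1 =
      (PySem.List.max? (PySem.Set.ofList (pvColors g h w))
        (fun a => (((pvColors g h w).count a : Int)))).getD 1
    cases hmax : PySem.List.max? (PySem.Set.ofList (pvColors g h w))
        (fun a => (((pvColors g h w).count a : Int))) with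
    | none => exact absurd ((PySem.List.max?_eq_none_iff _ _).mp hmax) (ofList_ne_nil hc)
    | some k0 => rfl

theorem ports_eq (grid : List (List Int)) : fill_interior grid = fill_interior_alt grid := by
  by_cases hg : grid = [] ∨ grid.headD [] = []
  · unfold fill_interior fill_interior_alt
    rw [if_pos hg, if_pos hg]
  · unfold fill_interior fill_interior_alt
    rw [if_neg hg, if_neg hg]
    show pvWrite grid grid.length (grid.headD []).length
        (pvALoop grid grid.length (grid.headD []).length
          (pvASeed grid grid.length (grid.headD []).length).1
          (pvASeed grid grid.length (grid.headD []).length).2)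
        (if pvColors grid grid.length (grid.headD []).length ≠ [] then
          ((PySem.List.sorted
            (PySem.Dict.counter (pvColors grid grid.length (grid.headD []).length)).items
            (fun p => p.2) true).headD (0, 0)).1
        else 1)
      = pvWrite grid grid.length (grid.headD []).length
        (pvBLoop grid grid.length (grid.headD []).length
          (pvBSeed grid grid.length (grid.headD []).length))
        (if (pvBCounts grid grid.length (grid.headD []).length).keys ≠ [] then
          (PySem.List.max? (pvBCounts grid grid.length (grid.headD []).length).keys
            (fun k => (pvBCounts grid grid.length (grid.headD []).length).getD k 0)).getD 1
        else 1)
    rw [pvExt_eq]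
    exact congrArg _ (pvFill_eq grid grid.length (grid.headD []).length)

-- ===== VERDICT (by name: the statement is the Claim_ definition above) =====
theorem fill_interior_spec : Claim_equal_fill_interior := by
  intro grid _ _
  show fill_interior grid = fill_interior_alt grid
  exact ports_eq grid
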